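-- pv_equiv track=rewrite | github.com/DbDefenders/Esil.Noise.Model-S | utils/audio/analysor/__init__.py | find_sound_events
-- ===== SOURCE A (Python) =====
-- def find_sound_events(arr, interval):
--     if list(arr)==0:
--         return 0, []
--
--     intervals = []
--     current_interval = [arr[0]]
--
--     for i in range(1, len(arr)):
--         if abs(arr[i] - arr[i - 1]) < interval:
--             current_interval.append(arr[i])
--         else:
--             intervals.append(current_interval)
--             current_interval = [arr[i]]
--
--     intervals.append(current_interval)
--
--     result = []
--     for i in range(len(intervals)):
--         result.append([intervals[i][0], intervals[i][-1]])
--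
--     return len(intervals), result
-- ===== SOURCE B (Python) =====
-- def find_sound_events(arr, interval):
--     n = len(arr)
--     cuts = [0] + [i for i in range(1, n) if abs(arr[i] - arr[i - 1]) >= interval] + [n]
--     result = [[arr[b], arr[e - 1]] for b, e in zip(cuts, cuts[1:])]
--     return len(result), result
-- ===== Notes on version B (the rewrite author's own statement) =====
-- stated objective: alternative
-- what changed: Instead of folding elements into per-group lists and then extracting endpoints, B first computes the list of cut indices (positions where the adjacent difference reaches the threshold) by a filter over indices, then pairs consecutive cuts with zip and reads each group's endpoints directly from arr by index.
-- outside the precondition, e.g. on find_sound_events([], 5): A raises IndexError, B raises IndexError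
import Mathlib
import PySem

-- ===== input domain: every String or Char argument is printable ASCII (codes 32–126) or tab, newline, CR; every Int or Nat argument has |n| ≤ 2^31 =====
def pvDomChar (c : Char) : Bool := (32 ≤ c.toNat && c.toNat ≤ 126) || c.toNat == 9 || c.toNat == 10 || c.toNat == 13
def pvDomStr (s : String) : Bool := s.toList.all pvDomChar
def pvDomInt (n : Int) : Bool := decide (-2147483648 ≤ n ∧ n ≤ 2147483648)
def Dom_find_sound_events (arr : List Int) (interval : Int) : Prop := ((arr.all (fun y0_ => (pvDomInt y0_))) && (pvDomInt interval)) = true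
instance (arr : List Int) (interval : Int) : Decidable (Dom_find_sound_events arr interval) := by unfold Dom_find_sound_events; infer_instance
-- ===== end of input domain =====

-- B replaces A's fold-into-group-lists-then-extract-endpoints with a staged index
-- computation: it filters the cut indices (where the adjacent difference reaches the
-- threshold), zips consecutive cuts, and reads each group's endpoints from arr by index.

-- ===== PORT A =====
-- 'if list(arr) == 0' compares a list with an int, always False, so A never takes the
-- early return and arr[0] raises IndexError on []; that input is excluded by Pre_ below.
def find_sound_events (arr : List Int) (interval : Int) : Int × List (List Int) :=
  let st := (PySem.List.pyRange 1 arr.length 1).foldl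
    (fun (st : List (List Int) × List Int) i =>
      if |PySem.List.pyGetD arr i 0 - PySem.List.pyGetD arr (i - 1) 0| < interval then
        (st.1, st.2 ++ [PySem.List.pyGetD arr i 0])
      else
        (st.1 ++ [st.2], [PySem.List.pyGetD arr i 0]))
    ([], [PySem.List.pyGetD arr 0 0])
  let intervals := st.1 ++ [st.2]
  let result := (PySem.List.pyRange 0 intervals.length 1).foldl
    (fun (acc : List (List Int)) i =>
      acc ++ [[PySem.List.pyGetD (PySem.List.pyGetD intervals i []) 0 0,
               PySem.List.pyGetD (PySem.List.pyGetD intervals i []) (-1) 0]])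
    []
  ((intervals.length : Int), result)

-- ===== PORT B =====
def find_sound_events_alt (arr : List Int) (interval : Int) : Int × List (List Int) :=
  let n : Int := arr.length
  let cuts : List Int := [0] ++ (PySem.List.pyRange 1 n 1).filter
      (fun i => decide (interval ≤ |PySem.List.pyGetD arr i 0 - PySem.List.pyGetD arr (i - 1) 0|)) ++ [n]
  let result := (cuts.zip (PySem.List.slice cuts (some 1) none)).map
      (fun be => [PySem.List.pyGetD arr be.1 0, PySem.List.pyGetD arr (be.2 - 1) 0])
  ((result.length : Int), result)

-- ===== PRECONDITION & SPEC =====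
-- Pre_ excludes only the empty list, on which A raises IndexError at arr[0].
def Pre_find_sound_events (arr : List Int) (interval : Int) : Prop := arr ≠ []
instance (arr : List Int) (interval : Int) : Decidable (Pre_find_sound_events arr interval) := by unfold Pre_find_sound_events; infer_instance
def pvWitness_find_sound_events : List Int × Int := ([1, 3, 10], 3)

def Spec_find_sound_events (arr : List Int) (interval : Int) (out : Int × List (List Int)) : Prop := out = find_sound_events_alt arr interval
instance (arr : List Int) (interval : Int) (out : Int × List (List Int)) : Decidable (Spec_find_sound_events arr interval out) := by unfold Spec_find_sound_events; infer_instance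

-- ===== CLAIM (what is proved, stated in full; the proofs are below) =====
def Claim_equal_find_sound_events : Prop := ∀ (arr : List Int) (interval : Int), Dom_find_sound_events arr interval → Pre_find_sound_events arr interval → Spec_find_sound_events arr interval (find_sound_events arr interval)

-- ===== LEMMAS AND PROOFS =====

-- endpoint pair of a group, as A's second loop computes it
def pvPair (iv : List Int) : List Int :=
  [PySem.List.pyGetD iv 0 0, PySem.List.pyGetD iv (-1) 0]

-- B's cut list (without the final bound), for any index bound b
def pvCuts (arr : List Int) (interval : Int) (b : Int) : List Int :=
  0 :: (PySem.List.pyRange 1 b 1).filter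
      (fun i => decide (interval ≤ |PySem.List.pyGetD arr i 0 - PySem.List.pyGetD arr (i - 1) 0|))

theorem pvCuts_ne_nil (arr : List Int) (interval b : Int) : pvCuts arr interval b ≠ [] := by
  simp [pvCuts]

theorem pvFoldAppendMap {α β : Type} (g : α → β) (xs : List α) (init : List β) :
    xs.foldl (fun acc x => acc ++ [g x]) init = init ++ xs.map g := by
  induction xs generalizing init with
  | nil => simp
  | cons x xs ih => simp [List.foldl, ih]

theorem pvPair_spec (iv : List Int) (s p : Int) (hne : iv ≠ [])
    (hh : iv.head? = some s) (hl : iv.getLast? = some p) : pvPair iv = [s, p] := by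
  have hgd : iv.getD 0 0 = s := by
    cases iv with
    | nil => simp at hne
    | cons a t => simp at hh; simp [hh]
  have hgl : iv.getLast hne = p := by rwa [List.getLast_eq_iff_getLast?_eq_some]
  unfold pvPair
  rw [PySem.List.pyGetD_zero, PySem.List.pyGetD_neg_one iv 0 hne, hgd, hgl]

-- zipping a cut list with its tail, after appending one more cut
theorem pvZipConsecAppend {α : Type} (C : List α) (x : α) (hC : C ≠ []) :
    (C ++ [x]).zip ((C ++ [x]).drop 1) = C.zip (C.drop 1) ++ [(C.getLast hC, x)] := by
  induction C with
  | nil => simp at hC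
  | cons a C ih =>
    cases C with
    | nil => simp [List.zip]
    | cons b C' =>
      have h2 : (b :: C') ≠ [] := by simp
      have := ih h2
      simp only [List.cons_append, List.drop_succ_cons, List.drop_zero] at this ⊢
      simp [List.zip_cons_cons, this, List.getLast_cons h2]

-- loop invariant relating A's fold state after indices 1..m to B's cut list bounded by m+1
theorem pvLoopInv (arr : List Int) (interval : Int) (m : Nat) (hm : m < arr.length) :
    (let C := pvCuts arr interval ((m : Int) + 1)
     let A := (PySem.List.pyRange 1 ((m : Int) + 1) 1).foldl
        (fun (st : List (List Int) × List Int) i =>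
          if |PySem.List.pyGetD arr i 0 - PySem.List.pyGetD arr (i - 1) 0| < interval then
            (st.1, st.2 ++ [PySem.List.pyGetD arr i 0])
          else
            (st.1 ++ [st.2], [PySem.List.pyGetD arr i 0]))
        ([], [PySem.List.pyGetD arr 0 0])
     A.1.map pvPair = (C.zip (C.drop 1)).map
        (fun be => [PySem.List.pyGetD arr be.1 0, PySem.List.pyGetD arr (be.2 - 1) 0]) ∧
       A.2 ≠ [] ∧
       A.2.head? = C.getLast?.map (fun c => PySem.List.pyGetD arr c 0) ∧
       A.2.getLast? = some (PySem.List.pyGetD arr (m : Int) 0)) := by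
  induction m with
  | zero =>
    have h0 : (((0 : Nat) : Int) + 1) = (1 : Int) := by norm_num
    have hr : PySem.List.pyRange 1 1 1 = ([] : List Int) := by decide
    rw [h0]
    simp [pvCuts, hr]
  | succ m ih =>
    have hm' : m < arr.length := by omega
    obtain ⟨h1, h2, h3, h4⟩ := ih hm'
    have hc1 : (((m + 1 : Nat)) : Int) = (m : Int) + 1 := by push_cast; ring
    have hrange : PySem.List.pyRange 1 ((m : Int) + 1 + 1) 1
        = PySem.List.pyRange 1 ((m : Int) + 1) 1 ++ [(m : Int) + 1] :=
      PySem.List.pyRange_one_succ_right (by omega : (1 : Int) ≤ (m : Int) + 1)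
    rw [hc1, hrange]
    simp only [List.foldl_append, List.foldl_cons, List.foldl_nil]
    set A := (PySem.List.pyRange 1 ((m : Int) + 1) 1).foldl
        (fun (st : List (List Int) × List Int) i =>
          if |PySem.List.pyGetD arr i 0 - PySem.List.pyGetD arr (i - 1) 0| < interval then
            (st.1, st.2 ++ [PySem.List.pyGetD arr i 0])
          else
            (st.1 ++ [st.2], [PySem.List.pyGetD arr i 0]))
        ([], [PySem.List.pyGetD arr 0 0]) with hA
    set C := pvCuts arr interval ((m : Int) + 1) with hC
    have hCne : C ≠ [] := pvCuts_ne_nil arr interval ((m : Int) + 1)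
    have hC' : pvCuts arr interval ((m : Int) + 1 + 1)
        = C ++ (([(m : Int) + 1]).filter
            (fun i => decide (interval ≤ |PySem.List.pyGetD arr i 0 - PySem.List.pyGetD arr (i - 1) 0|))) := by
      simp only [pvCuts, hrange, List.filter_append, hC]
      simp
    rw [show ((m : Int) + 1 - 1) = (m : Int) from by ring] at *
    by_cases hcond : |PySem.List.pyGetD arr ((m : Int) + 1) 0 - PySem.List.pyGetD arr (m : Int) 0| < interval
    · have hfilt : (([(m : Int) + 1]).filter
          (fun i => decide (interval ≤ |PySem.List.pyGetD arr i 0 - PySem.List.pyGetD arr (i - 1) 0|))) = [] := by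
        simp only [List.filter_cons, List.filter_nil]
        rw [show ((m : Int) + 1 - 1) = (m : Int) from by ring]
        rw [if_neg]
        simp only [decide_eq_true_eq]
        exact not_le.mpr hcond
      rw [hC', hfilt, List.append_nil]
      simp only [hcond, if_true]
      refine ⟨h1, by simp, ?_, by simp⟩
      rw [List.head?_append_of_ne_nil _ h2, h3]
    · have hfilt : (([(m : Int) + 1]).filter
          (fun i => decide (interval ≤ |PySem.List.pyGetD arr i 0 - PySem.List.pyGetD arr (i - 1) 0|))) = [(m : Int) + 1] := by
        simp only [List.filter_cons, List.filter_nil]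
        rw [show ((m : Int) + 1 - 1) = (m : Int) from by ring]
        rw [if_pos]
        simp only [decide_eq_true_eq]
        exact not_lt.mp hcond
      rw [hC', hfilt]
      simp only [hcond, if_false]
      have hlastC : C.getLast? = some (C.getLast hCne) := List.getLast?_eq_some_getLast hCne
      have h3' : A.2.head? = some (PySem.List.pyGetD arr (C.getLast hCne) 0) := by
        rw [h3, hlastC]; rfl
      have hzip := pvZipConsecAppend C ((m : Int) + 1) hCne
      refine ⟨?_, by simp, ?_, by simp⟩
      · rw [hzip]
        simp only [List.map_append, h1, List.map_cons, List.map_nil]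
        rw [pvPair_spec A.2 _ _ h2 h3' h4]
        rw [show ((m : Int) + 1 - 1) = (m : Int) from by ring]
      · rw [List.getLast?_concat]
        rfl

-- ===== VERDICT (by name: the statement is the Claim_ definition above) =====
theorem find_sound_events_spec : Claim_equal_find_sound_events := by
  intro arr interval _ hpre
  unfold Spec_find_sound_events find_sound_events find_sound_events_alt
  dsimp only
  have hlen : 0 < arr.length := List.length_pos_of_ne_nil hpre
  set m : Nat := arr.length - 1 with hmdef
  have hm : m < arr.length := by omega
  have hcast : (arr.length : Int) = (m : Int) + 1 := by
    have h : arr.length = m + 1 := by omega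
    rw [h]; push_cast; ring
  have inv := pvLoopInv arr interval m hm
  simp only at inv
  obtain ⟨h1, h2, h3, h4⟩ := inv
  rw [hcast]
  set A := (PySem.List.pyRange 1 ((m : Int) + 1) 1).foldl
      (fun (st : List (List Int) × List Int) i =>
        if |PySem.List.pyGetD arr i 0 - PySem.List.pyGetD arr (i - 1) 0| < interval then
          (st.1, st.2 ++ [PySem.List.pyGetD arr i 0])
        else
          (st.1 ++ [st.2], [PySem.List.pyGetD arr i 0]))
      ([], [PySem.List.pyGetD arr 0 0]) with hA
  set C := pvCuts arr interval ((m : Int) + 1) with hC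
  have hCne : C ≠ [] := pvCuts_ne_nil arr interval ((m : Int) + 1)
  have hlastC : C.getLast? = some (C.getLast hCne) := List.getLast?_eq_some_getLast hCne
  have h3' : A.2.head? = some (PySem.List.pyGetD arr (C.getLast hCne) 0) := by
    rw [h3, hlastC]; rfl
  -- A's second loop is a fold over the groups, hence a map of pvPair
  have hloop2 : (PySem.List.pyRange 0 (((A.1 ++ [A.2]).length : Int)) 1).foldl
      (fun (acc : List (List Int)) i =>
        acc ++ [[PySem.List.pyGetD (PySem.List.pyGetD (A.1 ++ [A.2]) i []) 0 0,
                 PySem.List.pyGetD (PySem.List.pyGetD (A.1 ++ [A.2]) i []) (-1) 0]])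
      [] = (A.1 ++ [A.2]).map pvPair := by
    rw [PySem.List.foldl_pyRange_zero_pyGetD' (A.1 ++ [A.2]) []
        (fun (acc : List (List Int)) iv =>
          acc ++ [[PySem.List.pyGetD iv 0 0, PySem.List.pyGetD iv (-1) 0]]) []]
    rw [pvFoldAppendMap]
    simp [pvPair]
  -- B's cut list is C with the final bound appended; slice is drop 1
  have hcuts : ([(0 : Int)] ++ (PySem.List.pyRange 1 ((m : Int) + 1) 1).filter
      (fun i => decide (interval ≤ |PySem.List.pyGetD arr i 0 - PySem.List.pyGetD arr (i - 1) 0|))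
      ++ [(m : Int) + 1]) = C ++ [(m : Int) + 1] := by
    simp [hC, pvCuts]
  have hslice : ∀ (xs : List Int), PySem.List.slice xs (some 1) none = xs.drop 1 := by
    intro xs
    simpa using PySem.List.slice_from (xs := xs) (a := 1) (by omega)
  rw [hcuts, hslice]
  have hzip := pvZipConsecAppend C ((m : Int) + 1) hCne
  have hmap : ((C ++ [(m : Int) + 1]).zip ((C ++ [(m : Int) + 1]).drop 1)).map
      (fun be => [PySem.List.pyGetD arr be.1 0, PySem.List.pyGetD arr (be.2 - 1) 0])
      = (A.1 ++ [A.2]).map pvPair := by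
    rw [hzip]
    simp only [List.map_append, ← h1, List.map_cons, List.map_nil]
    rw [pvPair_spec A.2 _ _ h2 h3' h4]
    rw [show ((m : Int) + 1 - 1) = (m : Int) from by ring]
  rw [hloop2, hmap]
  simp
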